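-- pv_equiv track=rewrite | github.com/nd-net/plist-buddy | tests/test_file_reader.py | striplead
-- ===== SOURCE A (Python) =====
-- def striplead(text):
--     if text.startswith("\n"):
--         index = 1
--         while index < len(text) and text[index] in " \t":
--             index += 1
--         replacement = text[:index]
--         text = text[index:].replace(replacement, "\n")
--     return text
-- ===== SOURCE B (Python) =====
-- def striplead(text):
--     if not text.startswith("\n"):
--         return text
--     body = text[1:]
--     rest = body.lstrip(" \t")
--     indent = body[:len(body) - len(rest)]
--     lines = rest.split("\n")
--     out = [lines[0]]
--     for ln in lines[1:]:
--         out.append(ln[len(indent):] if ln.startswith(indent) else ln)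
--     return "\n".join(out)
-- ===== Notes on version B (the rewrite author's own statement) =====
-- stated objective: alternative
-- what changed: A removes the leading newline-plus-indent prefix with one global str.replace over the remainder; B instead splits the remainder into lines on the newline character and explicitly strips a single leading copy of the indent from every line after the first, then rejoins.
import Mathlib
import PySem

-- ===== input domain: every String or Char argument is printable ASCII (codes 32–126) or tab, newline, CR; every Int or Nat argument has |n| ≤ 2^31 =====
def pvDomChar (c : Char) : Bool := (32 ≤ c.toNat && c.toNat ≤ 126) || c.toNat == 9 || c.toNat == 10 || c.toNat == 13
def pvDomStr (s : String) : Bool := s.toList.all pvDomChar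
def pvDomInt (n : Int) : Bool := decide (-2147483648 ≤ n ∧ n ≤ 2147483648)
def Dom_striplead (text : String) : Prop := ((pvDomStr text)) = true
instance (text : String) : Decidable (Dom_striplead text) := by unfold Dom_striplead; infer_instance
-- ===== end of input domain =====

-- B replaces A's single global str.replace of the "\n"+indent prefix by an explicit per-line dedent
-- (split the remainder on "\n", strip one leading indent from each later line, rejoin); objective: alternative decomposition.

-- ===== PORT A =====
-- while index < len(text) and text[index] in " \t": index += 1
def stripleadGo (text : List Char) (index : Nat) : Nat :=
  if h : index < text.length then
    if PySem.Chars.isIn [text[index]] [' ', '\t'] then stripleadGo text (index + 1) else index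
  else index
termination_by text.length - index

def striplead (text : String) : String :=
  if PySem.Str.startswith text "\n" then
    let index := stripleadGo text.toList 1
    let replacement := PySem.Chars.slice text.toList none (some (index : Int))   -- text[:index]
    -- text[index:].replace(replacement, "\n")
    String.ofList (PySem.Chars.replace (PySem.Chars.slice text.toList (some (index : Int)) none) replacement ['\n'])
  else text

-- ===== PORT B =====
-- ln[len(indent):] if ln.startswith(indent) else ln
def dedentLine (indent line : List Char) : List Char :=
  if PySem.Chars.startswith line indent then PySem.Chars.slice line (some (indent.length : Int)) none else line

def striplead_alt (text : String) : String :=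
  if PySem.Str.startswith text "\n" then
    let body := PySem.Chars.slice text.toList (some (1 : Int)) none              -- text[1:]
    let rest := body.dropWhile (fun c => c == ' ' || c == '\t')                  -- body.lstrip(" \t"), ported by hand: exact (drops every leading space/tab)
    let indent := PySem.Chars.slice body none (some ((body.length - rest.length : Nat) : Int))  -- body[:len(body)-len(rest)]
    match PySem.Chars.splitOn rest ['\n'] with                                   -- rest.split("\n"); lines[0] / lines[1:]
    | [] => ""  -- unreachable: str.split("\n") always yields at least one piece
    | l0 :: ls => String.ofList (PySem.Chars.join ['\n'] (l0 :: ls.map (dedentLine indent)))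
  else text

-- ===== PRECONDITION & SPEC =====
def Spec_striplead (text : String) (out : String) : Prop := out = striplead_alt text
instance (text : String) (out : String) : Decidable (Spec_striplead text out) := by unfold Spec_striplead; infer_instance

-- ===== CLAIM (what is proved, stated in full; the proofs are below) =====
def Claim_equal_striplead : Prop := ∀ (text : String), Dom_striplead text → Spec_striplead text (striplead text)

-- ===== LEMMAS AND PROOFS =====

-- the space/tab predicate both sides scan with
def pvP (c : Char) : Bool := c == ' ' || c == '\t'

-- what A's replace computes, written as a direct recursion: at each '\n' followed by the
-- indent, keep the '\n' and drop the indent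
def dedentR (ind : List Char) : List Char → List Char
  | [] => []
  | c :: t =>
    if c = '\n' ∧ ind.isPrefixOf t then '\n' :: dedentR ind (List.drop ind.length t)
    else c :: dedentR ind t
termination_by s => s.length
decreasing_by all_goals (simp; try omega)

-- the line decomposition B's split computes
def pySplit : List Char → List (List Char)
  | [] => [[]]
  | c :: t =>
    if c = '\n' then [] :: pySplit t
    else
      match pySplit t with
      | [] => [[c]]
      | l0 :: ls => (c :: l0) :: ls

theorem isIn_single_spacetab (c : Char) : PySem.Chars.isIn [c] [' ', '\t'] = pvP c := by
  by_cases hc : c = ' ' ∨ c = '\t'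
  · have h1 : PySem.Chars.isIn [c] [' ', '\t'] = true :=
      (PySem.Chars.isIn_iff_infix _ _).mpr (by rcases hc with rfl | rfl
                                               · exact ⟨[], ['\t'], rfl⟩
                                               · exact ⟨[' '], [], rfl⟩)
    rw [h1]; rcases hc with rfl | rfl <;> simp [pvP]
  · have h1 : PySem.Chars.isIn [c] [' ', '\t'] = false := by
      rw [PySem.Chars.isIn_eq_false_iff]
      intro hin
      have hm : c ∈ [' ', '\t'] := hin.subset (by simp)
      simp only [List.mem_cons] at hm
      exact hc (by tauto)
    rw [h1]
    rcases not_or.mp hc with ⟨h2, h3⟩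
    simp [pvP, h2, h3]

theorem stripleadGo_eq (s : List Char) (i : Nat) :
    stripleadGo s i = i + (List.takeWhile pvP (s.drop i)).length := by
  induction i using stripleadGo.induct s with
  | case1 i h hin ih =>
    rw [stripleadGo, dif_pos h, if_pos hin]
    rw [isIn_single_spacetab] at hin
    rw [List.drop_eq_getElem_cons h, List.takeWhile_cons, hin]
    simp [ih]; omega
  | case2 i h hin =>
    rw [stripleadGo, dif_pos h, if_neg hin]
    rw [isIn_single_spacetab] at hin
    rw [List.drop_eq_getElem_cons h, List.takeWhile_cons]
    simp [hin]
  | case3 i h =>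
    rw [stripleadGo, dif_neg h]
    rw [List.drop_eq_nil_of_le (by omega)]
    simp

theorem replaceGo_eq (ind : List Char) (fuel : Nat) (s acc : List Char) (h : s.length ≤ fuel) :
    PySem.Chars.replace.go ('\n' :: ind) ['\n'] fuel s acc = acc.reverse ++ dedentR ind s := by
  induction fuel generalizing s acc with
  | zero =>
    have : s = [] := List.eq_nil_of_length_eq_zero (by omega)
    subst this
    simp [PySem.Chars.replace.go, dedentR]
  | succ fuel ih =>
    cases s with
    | nil => simp [PySem.Chars.replace.go, dedentR]
    | cons c t =>
      rw [PySem.Chars.replace.go]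
      simp only [List.isPrefixOf]
      by_cases hc : c = '\n' ∧ ind.isPrefixOf t = true
      · obtain ⟨rfl, hp⟩ := hc
        simp only [hp, beq_self_eq_true, Bool.true_and, if_pos]
        rw [ih _ _ (by simp at h ⊢; omega)]
        rw [dedentR, if_pos ⟨rfl, hp⟩]
        simp
      · have hb : (('\n' == c) && ind.isPrefixOf t) = false := by
          by_cases hceq : c = '\n'
          · subst hceq
            rcases Bool.eq_false_or_eq_true (ind.isPrefixOf t) with hp | hp
            · exact absurd ⟨rfl, hp⟩ hc
            · simp [hp]
          · have hne : ('\n' == c) = false := by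
              rw [beq_eq_false_iff_ne]; exact fun hx => hceq hx.symm
            simp [hne]
        simp only [hb, Bool.false_eq_true, if_false]
        rw [ih _ _ (by simp at h ⊢; omega)]
        rw [dedentR, if_neg hc]
        simp

theorem pySplit_ne_nil (l : List Char) : pySplit l ≠ [] := by
  cases l with
  | nil => simp [pySplit]
  | cons c t =>
    rw [pySplit]
    split
    · simp
    · split <;> simp

theorem pySplit_cons_eq (l : List Char) :
    pySplit l = (pySplit l).headD [] :: (pySplit l).tail := by
  rcases hl : pySplit l with _ | ⟨l0, ls⟩
  · exact absurd hl (pySplit_ne_nil l)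
  · simp

theorem splitGo_eq (fuel : Nat) (l cur : List Char) (acc : List (List Char)) (h : l.length < fuel) :
    PySem.Chars.splitOn.go ['\n'] fuel l cur acc =
      acc.reverse ++ (cur.reverse ++ (pySplit l).headD []) :: (pySplit l).tail := by
  induction fuel generalizing l cur acc with
  | zero => omega
  | succ fuel ih =>
    cases l with
    | nil => simp [PySem.Chars.splitOn.go, pySplit]
    | cons c t =>
      rw [PySem.Chars.splitOn.go]
      simp only [List.isPrefixOf]
      by_cases hc : c = '\n'
      · subst hc
        simp only [beq_self_eq_true, Bool.true_and, if_pos]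
        rw [ih _ _ _ (by simp at h ⊢; omega)]
        rw [pySplit, if_pos rfl]
        rw [pySplit_cons_eq t]
        simp
      · have hne : ('\n' == c) = false := by
          rw [beq_eq_false_iff_ne]; exact fun hx => hc hx.symm
        simp only [hne, Bool.false_and, Bool.false_eq_true, if_false]
        rw [ih _ _ _ (by simp at h ⊢; omega)]
        rw [pySplit, if_neg hc]
        rw [pySplit_cons_eq t]
        simp

theorem pySplit_head_prefix (l : List Char) : (pySplit l).headD [] <+: l := by
  induction l with
  | nil => simp [pySplit]
  | cons c t ih =>
    rw [pySplit]
    by_cases hc : c = '\n'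
    · simp [hc]
    · rw [if_neg hc, pySplit_cons_eq t]
      exact List.cons_prefix_cons.mpr ⟨rfl, ih⟩

theorem pySplit_head_prefixOf (ind : List Char) (hind : ('\n' : Char) ∉ ind) :
    ∀ t : List Char, ind.isPrefixOf t = true → ind.isPrefixOf ((pySplit t).headD []) = true := by
  induction ind with
  | nil => intro t _; simp
  | cons a as ih =>
    intro t hp
    cases t with
    | nil => simp at hp
    | cons c t' =>
      simp only [List.isPrefixOf, Bool.and_eq_true, beq_iff_eq] at hp
      obtain ⟨rfl, hp'⟩ := hp
      have hne : a ≠ '\n' := fun hx => hind (by simp [hx])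
      rw [pySplit, if_neg hne, pySplit_cons_eq t']
      simp only [List.headD_cons, List.isPrefixOf, beq_self_eq_true, Bool.true_and]
      exact ih (fun hx => hind (by simp [hx])) t' hp'

theorem pySplit_drop (ind : List Char) (hind : ('\n' : Char) ∉ ind) :
    ∀ t : List Char, ind.isPrefixOf t = true →
      pySplit (t.drop ind.length) = (((pySplit t).headD []).drop ind.length) :: (pySplit t).tail := by
  induction ind with
  | nil =>
    intro t _
    simpa using pySplit_cons_eq t
  | cons a as ih =>
    intro t hp
    cases t with
    | nil => simp at hp
    | cons c t' =>
      simp only [List.isPrefixOf, Bool.and_eq_true, beq_iff_eq] at hp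
      obtain ⟨rfl, hp'⟩ := hp
      have hne : a ≠ '\n' := fun hx => hind (by simp [hx])
      rw [List.length_cons, List.drop_succ_cons]
      rw [ih (fun hx => hind (by simp [hx])) t' hp']
      rw [pySplit, if_neg hne, pySplit_cons_eq t']
      simp

theorem dedentLine_eq (ind ln : List Char) :
    dedentLine ind ln = if ind.isPrefixOf ln then ln.drop ind.length else ln := by
  rw [dedentLine]
  rcases h : ind.isPrefixOf ln with _ | _ <;>
    simp [PySem.Chars.startswith, h, PySem.List.slice_from_natCast]

theorem dedentR_eq (ind : List Char) (hind : ('\n' : Char) ∉ ind) (l : List Char) :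
    dedentR ind l =
      (pySplit l).headD [] ++ ((pySplit l).tail).flatMap (fun ln => '\n' :: dedentLine ind ln) := by
  induction l using dedentR.induct ind with
  | case1 => simp [dedentR, pySplit]
  | case2 c t hc ih =>
    obtain ⟨rfl, hp⟩ := hc
    rw [dedentR, if_pos ⟨rfl, hp⟩]
    rw [pySplit, if_pos rfl]
    simp only [List.headD_cons, List.tail_cons, List.nil_append]
    rw [pySplit_cons_eq t, List.flatMap_cons]
    rw [ih, pySplit_drop ind hind t hp]
    simp only [List.headD_cons, List.tail_cons]
    rw [dedentLine_eq, if_pos (pySplit_head_prefixOf ind hind t hp)]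
    simp
  | case3 c t hc ih =>
    rw [dedentR, if_neg hc]
    by_cases hceq : c = '\n'
    · subst hceq
      have hnp : ind.isPrefixOf t = false := by
        rcases Bool.eq_false_or_eq_true (ind.isPrefixOf t) with hp | hp
        · exact absurd ⟨rfl, hp⟩ hc
        · exact hp
      rw [pySplit, if_pos rfl]
      simp only [List.headD_cons, List.tail_cons, List.nil_append]
      rw [pySplit_cons_eq t, List.flatMap_cons]
      rw [ih]
      have hnp0 : ind.isPrefixOf ((pySplit t).headD []) = false := by
        rcases Bool.eq_false_or_eq_true (ind.isPrefixOf ((pySplit t).headD [])) with hp | hp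
        · have h1 : ind <+: (pySplit t).headD [] := List.isPrefixOf_iff_prefix.mp hp
          have h2 : ind <+: t := h1.trans (pySplit_head_prefix t)
          rw [← List.isPrefixOf_iff_prefix] at h2
          rw [h2] at hnp; exact absurd hnp (by simp)
        · exact hp
      have hnp0' : ¬ ind <+: ((pySplit t).headD []) := by
        intro hx
        rw [← List.isPrefixOf_iff_prefix] at hx
        rw [hx] at hnp0
        exact absurd hnp0 (by simp)
      rw [dedentLine_eq, if_neg (by simpa using hnp0')]
      simp
    · rw [pySplit, if_neg hceq, pySplit_cons_eq t]
      simp only [List.headD_cons, List.tail_cons]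
      rw [ih, pySplit_cons_eq t]
      simp

theorem join_cons_map (f : List Char → List Char) (l0 : List Char) (ls : List (List Char)) :
    PySem.Chars.join ['\n'] (l0 :: ls.map f) = l0 ++ ls.flatMap (fun ln => '\n' :: f ln) := by
  induction ls generalizing l0 with
  | nil => simp [PySem.Chars.join_singleton]
  | cons a as ih =>
    rw [List.map_cons, PySem.Chars.join_cons_cons, ih]
    simp

theorem striplead_eq_alt (text : String) : striplead text = striplead_alt text := by
  rw [striplead, striplead_alt]
  by_cases hsw : PySem.Str.startswith text "\n" = true
  · rw [if_pos hsw, if_pos hsw]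
    simp only [PySem.Chars.slice_eq_listSlice]
    have hpre : ('\n' :: []) <+: text.toList := by
      have := (PySem.Chars.startswith_iff text.toList "\n".toList).mp hsw
      simpa using this
    obtain ⟨body, hbody⟩ := hpre
    simp only [List.cons_append, List.nil_append] at hbody
    set tw := List.takeWhile pvP body with htw
    set dw := List.dropWhile pvP body with hdw
    have hsplit : tw ++ dw = body := List.takeWhile_append_dropWhile
    have hidx : stripleadGo text.toList 1 = tw.length + 1 := by
      rw [stripleadGo_eq, ← hbody]
      simp [Nat.add_comm]
      rw [htw]
    have hrepl : PySem.List.slice text.toList none (some ((stripleadGo text.toList 1 : Nat) : Int))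
        = '\n' :: tw := by
      rw [hidx, PySem.List.slice_to_natCast, ← hbody]
      simp only [List.take_succ_cons]
      rw [← hsplit, List.take_left]
    have hrem : PySem.List.slice text.toList (some ((stripleadGo text.toList 1 : Nat) : Int)) none
        = dw := by
      rw [hidx, PySem.List.slice_from_natCast, ← hbody]
      simp only [List.drop_succ_cons]
      rw [← hsplit, List.drop_left]
    have hbodyB : PySem.List.slice text.toList (some (1 : Int)) none = body := by
      have h1 : ((1 : Nat) : Int) = (1 : Int) := rfl
      rw [← h1, PySem.List.slice_from_natCast, ← hbody, List.drop_succ_cons, List.drop_zero]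
    rw [hbodyB]
    have hrestB : body.dropWhile (fun c => c == ' ' || c == '\t') = dw := rfl
    rw [hrestB]
    have hindB : PySem.List.slice body none (some ((body.length - dw.length : Nat) : Int)) = tw := by
      rw [PySem.List.slice_to_natCast]
      have hlen : body.length - dw.length = tw.length := by
        rw [← hsplit]; simp
      rw [hlen, ← hsplit, List.take_left]
    rw [hindB, hrepl, hrem]
    have hind : ('\n' : Char) ∉ tw := by
      intro hmem
      have := List.mem_takeWhile_imp hmem
      simp [pvP] at this
    have hA : PySem.Chars.replace dw ('\n' :: tw) ['\n'] = dedentR tw dw := by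
      rw [PySem.Chars.replace]
      simp only [List.isEmpty_cons, Bool.false_eq_true, if_false]
      exact replaceGo_eq tw dw.length dw [] le_rfl
    rw [hA]
    have hB : PySem.Chars.splitOn dw ['\n'] =
        ((pySplit dw).headD []) :: (pySplit dw).tail := by
      rw [PySem.Chars.splitOn]
      rw [splitGo_eq (dw.length + 1) dw [] [] (by omega)]
      simp
    rw [hB]
    show String.ofList (dedentR tw dw) =
      String.ofList (PySem.Chars.join ['\n'] (((pySplit dw).headD []) :: ((pySplit dw).tail).map (dedentLine tw)))
    rw [join_cons_map]
    rw [dedentR_eq tw hind dw]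
  · rw [if_neg hsw, if_neg hsw]

-- ===== VERDICT (by name: the statement is the Claim_ definition above) =====
theorem striplead_spec : Claim_equal_striplead := by
  intro text _
  unfold Spec_striplead
  exact striplead_eq_alt text
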